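-- pv_equiv track=rewrite | github.com/DebojyotiMishra/EPITA-International-Bachelors-S2-Resources | Linear Algebra/algebra/relation.py | is_function_relation
-- ===== SOURCE A (Python) =====
-- from typing import Set, Tuple
--
-- def is_relation(a: Set, b: Set, r: Set[Tuple]) -> bool:
--     """a and b are given sets (Python set, not lset),
--     r is a set of tuples (x,y).
--     Determine whether r is a relation"""
--     assert isinstance(a, set)
--     assert isinstance(b, set)
--     assert isinstance(r, set)
--     # CHALLENGE: student must complete the implementation.
--
--     return all(x in a and y in b
--                for (x, y) in r)
--
-- def is_function_relation(a: Set, b: Set, r: Set[Tuple]) -> bool: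
--     """a is a given set (Python set, not lset),
--     r is a set of tuples (x,y) for which x is in a and y is in a.
--     Determine whether the relation is function relation"""
--     assert isinstance(a, set)
--     assert isinstance(b, set)
--     assert isinstance(r, set)
--     # CHALLENGE: student must complete the implementation.
--
--     return is_relation(a, b, r) \
--         and all(any((x, y) in r
--                     for y in b)
--                 for x in a) \
--         and all(b1 == b2
--                 for (a1, b1) in r
--                 for (a2, b2) in r
--                 if a1 == a2)
-- ===== SOURCE B (Python) =====
-- def is_function_relation(a, b, r) -> bool:
--     assert isinstance(a, set)
--     assert isinstance(b, set)
--     assert isinstance(r, set)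
--     mapping = {}
--     for (x, y) in r:
--         if x not in a or y not in b:
--             return False
--         if x in mapping:
--             if mapping[x] != y:
--                 return False
--         else:
--             mapping[x] = y
--     return all(x in mapping for x in a)
-- ===== Notes on version B (the rewrite author's own statement) =====
-- stated objective: alternative
-- what changed: Replaces A's three separate scans (relation membership check, |a|*|b| totality search, |r|^2 pairwise single-valuedness check) by one pass over r building a dict x->y that detects membership violations and conflicting values, followed by one pass over a checking domain coverage.
import Mathlib
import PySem

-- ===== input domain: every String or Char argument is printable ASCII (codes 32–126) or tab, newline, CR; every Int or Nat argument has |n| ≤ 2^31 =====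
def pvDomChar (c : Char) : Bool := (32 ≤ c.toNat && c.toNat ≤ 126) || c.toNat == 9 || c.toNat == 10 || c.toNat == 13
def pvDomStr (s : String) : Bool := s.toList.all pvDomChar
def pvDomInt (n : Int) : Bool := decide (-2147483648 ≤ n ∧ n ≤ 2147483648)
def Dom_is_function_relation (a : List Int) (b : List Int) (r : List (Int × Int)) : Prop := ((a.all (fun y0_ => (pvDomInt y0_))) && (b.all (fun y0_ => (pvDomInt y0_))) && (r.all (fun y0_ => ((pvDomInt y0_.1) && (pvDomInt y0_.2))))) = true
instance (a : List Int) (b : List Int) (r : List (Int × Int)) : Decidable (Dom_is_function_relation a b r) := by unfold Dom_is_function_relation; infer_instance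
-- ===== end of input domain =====

-- B replaces A's three separate scans by a single dict-building pass over r plus a key check over a (alternative decomposition, same measured cost).
-- ===== PORT A =====
-- helper (Python's is_relation, from the same module)
def is_relation (a : List Int) (b : List Int) (r : List (Int × Int)) : Bool :=
  r.all (fun p => a.contains p.1 && b.contains p.2)

def is_function_relation (a : List Int) (b : List Int) (r : List (Int × Int)) : Bool :=
  is_relation a b r
    && a.all (fun x => b.any (fun y => r.contains (x, y)))
    && r.all (fun p => r.all (fun q => if p.1 == q.1 then p.2 == q.2 else true))

-- ===== PORT B =====
-- B: one pass over r building a dict x -> y (early exit on a non-member pair or a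
-- conflicting value), then one pass over a checking every element is a key.
def pvFnLoop (a : List Int) (b : List Int) :
    List (Int × Int) → PySem.Dict Int Int → Option (PySem.Dict Int Int)
  | [], d => some d
  | (x, y) :: t, d =>
    if !(a.contains x) || !(b.contains y) then none
    else
      match d.get? x with
      | some y' => if y' != y then none else pvFnLoop a b t d
      | none => pvFnLoop a b t (d.insert x y)

def is_function_relation_alt (a : List Int) (b : List Int) (r : List (Int × Int)) : Bool :=
  match pvFnLoop a b r PySem.Dict.empty with
  | none => false
  | some d => a.all (fun x => d.contains x)

-- ===== PRECONDITION & SPEC =====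
def Spec_is_function_relation (a : List Int) (b : List Int) (r : List (Int × Int)) (out : Bool) : Prop := out = is_function_relation_alt a b r
instance (a : List Int) (b : List Int) (r : List (Int × Int)) (out : Bool) : Decidable (Spec_is_function_relation a b r out) := by unfold Spec_is_function_relation; infer_instance

-- ===== CLAIM (what is proved, stated in full; the proofs are below) =====
def Claim_equal_is_function_relation : Prop := ∀ (a : List Int) (b : List Int) (r : List (Int × Int)), Dom_is_function_relation a b r → Spec_is_function_relation a b r (is_function_relation a b r)

-- ===== LEMMAS AND PROOFS =====

-- The loop succeeds iff every pair lies in a × b, every pair is consistent with the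
-- starting dict, and the processed pairs are pairwise single-valued.
theorem pvFnLoop_isSome (a b : List Int) :
    ∀ (l : List (Int × Int)) (d : PySem.Dict Int Int),
      (pvFnLoop a b l d).isSome = true ↔
        ((∀ p ∈ l, p.1 ∈ a ∧ p.2 ∈ b) ∧
         (∀ p ∈ l, ∀ y', d.get? p.1 = some y' → p.2 = y') ∧
         (∀ p ∈ l, ∀ q ∈ l, p.1 = q.1 → p.2 = q.2)) := by
  intro l
  induction l with
  | nil => intro d; simp [pvFnLoop]
  | cons hd t ih =>
    intro d
    obtain ⟨x, y⟩ := hd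
    by_cases hxy : x ∈ a ∧ y ∈ b
    · rcases hxy with ⟨hx, hy⟩
      rw [show pvFnLoop a b ((x, y) :: t) d =
          (match d.get? x with
           | some y' => if y' != y then none else pvFnLoop a b t d
           | none => pvFnLoop a b t (d.insert x y)) by
        simp [pvFnLoop, hx, hy]]
      rcases hg : d.get? x with _ | y' <;> dsimp only
      · -- x not yet in the dict: recurse with d.insert x y
        rw [ih (d.insert x y)]
        constructor
        · rintro ⟨hrel, hcons, hsv⟩
          refine ⟨?_, ?_, ?_⟩
          · intro p hp
            rcases List.mem_cons.mp hp with rfl | hp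
            · exact ⟨hx, hy⟩
            · exact hrel p hp
          · intro p hp y'' hpg
            rcases List.mem_cons.mp hp with rfl | hp
            · dsimp only at hpg; rw [hg] at hpg; cases hpg
            · by_cases hpx : p.1 = x
              · rw [hpx, hg] at hpg; cases hpg
              · exact hcons p hp y'' (by rw [PySem.Dict.get?_insert]; simp [hpx, hpg])
          · intro p hp q hq hpq
            rcases List.mem_cons.mp hp with rfl | hp <;>
              rcases List.mem_cons.mp hq with rfl | hq
            · rfl
            · have := hcons q hq y
                (by rw [PySem.Dict.get?_insert]; dsimp only at hpq; simp [← hpq])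
              simp [this]
            · have := hcons p hp y
                (by rw [PySem.Dict.get?_insert]; dsimp only at hpq; simp [hpq])
              simp [this]
            · exact hsv p hp q hq hpq
        · rintro ⟨hrel, hcons, hsv⟩
          refine ⟨?_, ?_, ?_⟩
          · exact fun p hp => hrel p (List.mem_cons_of_mem _ hp)
          · intro p hp y'' hpg
            rw [PySem.Dict.get?_insert] at hpg
            split_ifs at hpg with hpx
            · cases hpg
              exact hsv p (List.mem_cons_of_mem _ hp) (x, y) (List.mem_cons_self) hpx
            · exact hcons p (List.mem_cons_of_mem _ hp) y'' hpg
          · intro p hp q hq hpq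
            exact hsv p (List.mem_cons_of_mem _ hp) q (List.mem_cons_of_mem _ hq) hpq
      · -- x already in the dict with value y'
        by_cases hne : y' = y
        · subst hne
          rw [show (y' != y') = false by simp]
          simp only [Bool.false_eq_true, if_false]
          rw [ih d]
          constructor
          · rintro ⟨hrel, hcons, hsv⟩
            refine ⟨?_, ?_, ?_⟩
            · intro p hp
              rcases List.mem_cons.mp hp with rfl | hp
              · exact ⟨hx, hy⟩
              · exact hrel p hp
            · intro p hp y'' hpg
              rcases List.mem_cons.mp hp with rfl | hp
              · dsimp only at hpg ⊢; rw [hg] at hpg; exact (Option.some_inj.mp hpg)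
              · exact hcons p hp y'' hpg
            · intro p hp q hq hpq
              rcases List.mem_cons.mp hp with rfl | hp <;>
                rcases List.mem_cons.mp hq with rfl | hq
              · rfl
              · have := hcons q hq y' (by dsimp only at hpq; rw [hpq] at hg; exact hg)
                simp [this]
              · have := hcons p hp y' (by dsimp only at hpq; rw [← hpq] at hg; exact hg)
                simp [this]
              · exact hsv p hp q hq hpq
          · rintro ⟨hrel, hcons, hsv⟩
            refine ⟨?_, ?_, ?_⟩
            · exact fun p hp => hrel p (List.mem_cons_of_mem _ hp)
            · exact fun p hp => hcons p (List.mem_cons_of_mem _ hp)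
            · intro p hp q hq hpq
              exact hsv p (List.mem_cons_of_mem _ hp) q (List.mem_cons_of_mem _ hq) hpq
        · rw [show (y' != y) = true by simp [hne]]
          simp only [if_true, Option.isSome_none, Bool.false_eq_true, false_iff]
          rintro ⟨_, hhd, _⟩
          exact hne (hhd ((x, y) : Int × Int) (List.mem_cons_self) y' hg).symm
    · have hnone : pvFnLoop a b ((x, y) :: t) d = none := by
        rcases Decidable.not_and_iff_or_not.mp hxy with h | h <;>
          simp [pvFnLoop, h]
      rw [hnone]
      simp only [Option.isSome_none, Bool.false_eq_true, false_iff]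
      rintro ⟨hrel, _, _⟩
      exact hxy (hrel ((x, y) : Int × Int) (List.mem_cons_self))

-- On success the final dict's keys are the starting keys plus the first components of l.
theorem pvFnLoop_contains (a b : List Int) :
    ∀ (l : List (Int × Int)) (d d' : PySem.Dict Int Int),
      pvFnLoop a b l d = some d' →
      ∀ z, d'.contains z = (d.contains z || l.any (fun p => p.1 == z)) := by
  intro l
  induction l with
  | nil => intro d d' h z; cases h; simp
  | cons hd t ih =>
    intro d d' h z
    obtain ⟨x, y⟩ := hd
    by_cases hxy : x ∈ a ∧ y ∈ b
    · rcases hxy with ⟨hx, hy⟩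
      rw [show pvFnLoop a b ((x, y) :: t) d =
          (match d.get? x with
           | some y' => if y' != y then none else pvFnLoop a b t d
           | none => pvFnLoop a b t (d.insert x y)) by
        simp [pvFnLoop, hx, hy]] at h
      rcases hg : d.get? x with _ | y' <;> rw [hg] at h <;> dsimp only at h
      · have := ih (d.insert x y) d' h z
        rw [this, PySem.Dict.contains_insert]
        simp only [List.any_cons]
        by_cases hzx : z = x
        · subst hzx; simp
        · have h1 : (z == x) = false := by simp [hzx]
          have h2 : (((x, y) : Int × Int).1 == z) = false := by
            simp; exact fun h' => hzx h'.symm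
          rw [h1, h2]; simp
      · by_cases hne : y' = y
        · subst hne
          rw [show (y' != y') = false by simp] at h
          simp only [Bool.false_eq_true, if_false] at h
          have := ih d d' h z
          rw [this]
          simp only [List.any_cons]
          by_cases hzx : x = z
          · have hc : d.contains z = true := by
              rw [PySem.Dict.contains_eq_isSome_get?, ← hzx, hg]; rfl
            have h2 : (((x, y') : Int × Int).1 == z) = true := by simp [hzx]
            rw [h2]; simp [hc]
          · have h2 : (((x, y') : Int × Int).1 == z) = false := by simp [hzx]
            rw [h2]; simp
        · rw [show (y' != y) = true by simp [hne]] at h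
          simp at h
    · exfalso
      rcases Decidable.not_and_iff_or_not.mp hxy with h' | h' <;>
        simp [pvFnLoop, h'] at h

-- ===== VERDICT (by name: the statement is the Claim_ definition above) =====
theorem is_function_relation_spec : Claim_equal_is_function_relation := by
  intro a b r _hdom
  unfold Spec_is_function_relation is_function_relation_alt
  rcases h : pvFnLoop a b r PySem.Dict.empty with _ | d
  · -- the loop failed: A must also be false
    have hns : ¬ (pvFnLoop a b r PySem.Dict.empty).isSome = true := by simp [h]
    rw [pvFnLoop_isSome] at hns
    rw [Bool.eq_false_iff]
    intro hA
    apply hns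
    unfold is_function_relation is_relation at hA
    simp only [Bool.and_eq_true, List.all_eq_true, List.any_eq_true] at hA
    obtain ⟨⟨hrel, _⟩, hsv⟩ := hA
    refine ⟨?_, ?_, ?_⟩
    · intro p hp
      have := hrel p hp
      simp only [List.contains_eq_mem, decide_eq_true_eq] at this
      exact this
    · intro p _ y' hpg
      rw [PySem.Dict.get?_empty] at hpg; cases hpg
    · intro p hp q hq hpq
      have := hsv p hp q hq
      simp only [hpq, BEq.rfl, if_true, beq_iff_eq] at this
      exact this
  · -- the loop succeeded
    have hs : (pvFnLoop a b r PySem.Dict.empty).isSome = true := by simp [h]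
    rw [pvFnLoop_isSome] at hs
    obtain ⟨hrel, _, hsv⟩ := hs
    have hcont := pvFnLoop_contains a b r _ _ h
    rw [Bool.eq_iff_iff]
    unfold is_function_relation is_relation
    simp only [Bool.and_eq_true, List.all_eq_true, List.any_eq_true,
      List.contains_eq_mem, decide_eq_true_eq, Bool.and_eq_true, beq_iff_eq]
    constructor
    · rintro ⟨⟨_, htot⟩, _⟩ x hx
      obtain ⟨y, _, hyr⟩ := htot x hx
      rw [hcont x]
      simp only [PySem.Dict.contains_empty, Bool.false_or, List.any_eq_true, beq_iff_eq]
      exact ⟨(x, y), hyr, rfl⟩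
    · intro hB
      refine ⟨⟨fun p hp => by simpa using hrel p hp, ?_⟩, ?_⟩
      · intro x hx
        have := hB x hx
        rw [hcont x] at this
        simp only [PySem.Dict.contains_empty, Bool.false_or, List.any_eq_true,
          beq_iff_eq] at this
        obtain ⟨p, hpr, hpx⟩ := this
        exact ⟨p.2, (hrel p hpr).2, by rw [← hpx, Prod.mk.eta]; exact hpr⟩
      · intro p hp q hq
        split
        · next heq => exact beq_iff_eq.mpr (hsv p hp q hq (by simpa using heq))
        · rfl
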